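-- pv_equiv track=rewrite | github.com/azaynul10/carbon-guard-cli | carbon_guard/dockerfile_optimizer.py | _combine_run_instructions
-- ===== SOURCE A (Python) =====
-- def _combine_run_instructions(content: str) -> str:
--     """Combine consecutive RUN instructions."""
--     lines = content.split('\n')
--     result_lines = []
--     run_buffer = []
--
--     for line in lines:
--         stripped = line.strip()
--         if stripped.upper().startswith('RUN'):
--             # Extract the command part
--             command = stripped[3:].strip()
--             run_buffer.append(command)
--         else:
--             # Flush run buffer if we have accumulated commands
--             if run_buffer:
--                 if len(run_buffer) > 1:
--                     combined = 'RUN ' + ' && \\\n    '.join(run_buffer)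
--                     result_lines.append(combined)
--                 else:
--                     result_lines.append(f'RUN {run_buffer[0]}')
--                 run_buffer = []
--             result_lines.append(line)
--
--     # Handle any remaining run commands
--     if run_buffer:
--         if len(run_buffer) > 1:
--             combined = 'RUN ' + ' && \\\n    '.join(run_buffer)
--             result_lines.append(combined)
--         else:
--             result_lines.append(f'RUN {run_buffer[0]}')
--
--     return '\n'.join(result_lines)
-- ===== SOURCE B (Python) =====
-- def _combine_run_instructions(content: str) -> str:
--     """Combine consecutive RUN instructions (span-grouping rewrite)."""
--
--     def is_run(line):
--         return line.strip().upper().startswith('RUN')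
--
--     lines = content.split('\n')
--     out = []
--     i, n = 0, len(lines)
--     while i < n:
--         if is_run(lines[i]):
--             j = i + 1
--             while j < n and is_run(lines[j]):
--                 j += 1
--             cmds = [l.strip()[3:].strip() for l in lines[i:j]]
--             if len(cmds) > 1:
--                 out.append('RUN ' + ' && \\\n    '.join(cmds))
--             else:
--                 out.append('RUN ' + cmds[0])
--             i = j
--         else:
--             out.append(lines[i])
--             i += 1
--     return '\n'.join(out)
-- ===== Notes on version B (the rewrite author's own statement) =====
-- stated objective: alternative
-- what changed: Replaced A's buffer-and-flush accumulator loop (with its duplicated end-of-loop flush) by span grouping: scan to the end of each maximal block of consecutive RUN lines, emit that block at once, and advance past it.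
import Mathlib
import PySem

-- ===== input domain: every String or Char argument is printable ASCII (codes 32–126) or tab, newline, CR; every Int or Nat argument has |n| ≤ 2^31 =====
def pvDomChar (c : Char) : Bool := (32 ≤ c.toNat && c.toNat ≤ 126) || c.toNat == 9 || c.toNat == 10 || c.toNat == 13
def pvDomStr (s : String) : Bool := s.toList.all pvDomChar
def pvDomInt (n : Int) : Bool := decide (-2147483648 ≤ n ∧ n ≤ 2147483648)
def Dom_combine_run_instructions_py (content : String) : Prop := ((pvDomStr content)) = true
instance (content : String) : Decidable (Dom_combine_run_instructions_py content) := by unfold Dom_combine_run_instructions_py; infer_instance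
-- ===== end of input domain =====

-- B replaces A's buffer-and-flush accumulator loop by span grouping over maximal blocks of
-- consecutive RUN lines (alternative decomposition, same cost).

-- ===== PORT A =====
-- helper: A's duplicated flush block (emit the buffered commands as one RUN instruction);
-- every call site guards with `if run_buffer:`, so buf is nonempty there (headD [] = buf[0]).
def pvEmitBuf (buf : List (List Char)) : List Char :=
  if buf.length > 1 then
    "RUN ".toList ++ PySem.Chars.join " && \\\n    ".toList buf
  else
    "RUN ".toList ++ buf.headD []

-- one iteration of A's for-loop; state = (result_lines, run_buffer)
def pvStepA (st : List (List Char) × List (List Char)) (line : List Char) :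
    List (List Char) × List (List Char) :=
  let stripped := PySem.Chars.strip line
  if PySem.Chars.startswith (PySem.Chars.upper stripped) "RUN".toList then
    (st.1, st.2 ++ [PySem.Chars.strip (PySem.Chars.slice stripped (some 3) none)])
  else if st.2 ≠ [] then
    (st.1 ++ [pvEmitBuf st.2, line], [])
  else
    (st.1 ++ [line], st.2)

def combine_run_instructions_py (content : String) : String :=
  let lines := PySem.Chars.splitOn content.toList "\n".toList
  let fin := lines.foldl pvStepA ([], [])
  let result_lines := if fin.2 ≠ [] then fin.1 ++ [pvEmitBuf fin.2] else fin.1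
  String.ofList (PySem.Chars.join "\n".toList result_lines)

-- ===== PORT B =====
def pvIsRun (line : List Char) : Bool :=
  PySem.Chars.startswith (PySem.Chars.upper (PySem.Chars.strip line)) "RUN".toList

def pvCmd (line : List Char) : List Char :=
  PySem.Chars.strip (PySem.Chars.slice (PySem.Chars.strip line) (some 3) none)

-- Source B's outer loop: each step consumes one non-RUN line, or a whole maximal RUN span
def pvGo : List (List Char) → List (List Char)
  | [] => []
  | l :: ls =>
    if pvIsRun l then
      let cmds := (l :: ls.takeWhile pvIsRun).map pvCmd
      (if cmds.length > 1 then
        "RUN ".toList ++ PySem.Chars.join " && \\\n    ".toList cmds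
      else
        "RUN ".toList ++ cmds.headD []) :: pvGo (ls.dropWhile pvIsRun)
    else
      l :: pvGo ls
termination_by l => l.length
decreasing_by
  · have := List.length_dropWhile_le pvIsRun ls
    simp; omega
  · simp

def combine_run_instructions_py_alt (content : String) : String :=
  String.ofList (PySem.Chars.join "\n".toList (pvGo (PySem.Chars.splitOn content.toList "\n".toList)))

-- ===== PRECONDITION & SPEC =====
def Spec_combine_run_instructions_py (content : String) (out : String) : Prop := out = combine_run_instructions_py_alt content
instance (content : String) (out : String) : Decidable (Spec_combine_run_instructions_py content out) := by unfold Spec_combine_run_instructions_py; infer_instance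

-- ===== CLAIM (what is proved, stated in full; the proofs are below) =====
def Claim_equal_combine_run_instructions_py : Prop := ∀ (content : String), Dom_combine_run_instructions_py content → Spec_combine_run_instructions_py content (combine_run_instructions_py content)

-- ===== LEMMAS AND PROOFS =====

-- A's final flush, as a function of the loop state
def pvFinish (st : List (List Char) × List (List Char)) : List (List Char) :=
  if st.2 ≠ [] then st.1 ++ [pvEmitBuf st.2] else st.1

-- what B produces from `lines` when A's loop still holds `buf` pending commands
def pvCont (buf lines : List (List Char)) : List (List Char) :=
  match buf with
  | [] => pvGo lines
  | _ :: _ =>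
    pvEmitBuf (buf ++ (lines.takeWhile pvIsRun).map pvCmd) :: pvGo (lines.dropWhile pvIsRun)

lemma pvStepA_run (st : List (List Char) × List (List Char)) (line : List Char)
    (h : pvIsRun line = true) : pvStepA st line = (st.1, st.2 ++ [pvCmd line]) := by
  rw [pvIsRun] at h
  have h' : PySem.Chars.startswith (PySem.Chars.upper (PySem.Chars.strip line)) ['R','U','N'] = true := h
  simp [pvStepA, h', pvCmd]

lemma pvStepA_not_run (st : List (List Char) × List (List Char)) (line : List Char)
    (h : pvIsRun line = false) :
    pvStepA st line =
      if st.2 ≠ [] then (st.1 ++ [pvEmitBuf st.2, line], []) else (st.1 ++ [line], st.2) := by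
  rw [pvIsRun] at h
  have h' : PySem.Chars.startswith (PySem.Chars.upper (PySem.Chars.strip line)) ['R','U','N'] = false := h
  simp [pvStepA, h']

lemma pvGo_cons_run (l : List Char) (ls : List (List Char)) (h : pvIsRun l = true) :
    pvGo (l :: ls) = pvEmitBuf ((l :: ls.takeWhile pvIsRun).map pvCmd) :: pvGo (ls.dropWhile pvIsRun) := by
  rw [pvGo, pvEmitBuf]
  simp [h]

lemma pvGo_cons_not_run (l : List Char) (ls : List (List Char)) (h : pvIsRun l = false) :
    pvGo (l :: ls) = l :: pvGo ls := by
  rw [pvGo]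
  simp [h]

lemma pvFold_cont : ∀ (lines res buf : List (List Char)),
    pvFinish (lines.foldl pvStepA (res, buf)) = res ++ pvCont buf lines := by
  intro lines
  induction lines with
  | nil =>
    intro res buf
    cases buf with
    | nil => simp [pvFinish, pvCont, pvGo]
    | cons b bs => simp [pvFinish, pvCont, pvGo]
  | cons l ls ih =>
    intro res buf
    by_cases h : pvIsRun l = true
    · rw [List.foldl_cons, pvStepA_run _ _ h, ih]
      cases buf with
      | nil =>
        simp only [pvCont]
        rw [pvGo_cons_run l ls h]
        simp
      | cons b bs =>
        simp only [pvCont, List.takeWhile_cons_of_pos h, List.dropWhile_cons_of_pos h]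
        simp
    · rw [Bool.not_eq_true] at h
      rw [List.foldl_cons, pvStepA_not_run _ _ h]
      cases buf with
      | nil =>
        simp only [ne_eq, not_true_eq_false]
        rw [if_neg (by simp), ih]
        simp [pvCont, pvGo_cons_not_run l ls h]
      | cons b bs =>
        rw [if_pos (by simp), ih]
        have ht : List.takeWhile pvIsRun (l :: ls) = [] := by simp [h]
        have hd : List.dropWhile pvIsRun (l :: ls) = l :: ls := by simp [h]
        simp [pvCont, ht, hd, pvGo_cons_not_run l ls h]

-- ===== VERDICT (by name: the statement is the Claim_ definition above) =====
theorem combine_run_instructions_py_spec : Claim_equal_combine_run_instructions_py := by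
  intro content _
  show combine_run_instructions_py content = combine_run_instructions_py_alt content
  rw [combine_run_instructions_py, combine_run_instructions_py_alt]
  have := pvFold_cont (PySem.Chars.splitOn content.toList "\n".toList) [] []
  rw [pvFinish] at this
  simp only [this]
  rfl
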